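-- pv_equiv track=rewrite | github.com/scummvm/scummvm | devtools/make_class.py | module_sort_key
-- ===== SOURCE A (Python) =====
-- high_sort_key = chr(0x7e)
--
-- def module_sort_key(mod):
-- 	'''
-- 	Sort key for .o files in module.mk
--
-- 	Files in a directory always before sub-dir contents.
-- 	Alphabetical order otherwise.
-- 	'''
-- 	parts = mod.split('/')
-- 	nparts = len(parts)
-- 	key = ''
-- 	for i in range(nparts):
-- 		if i < nparts - 1:
-- 			key += high_sort_key + parts[i] + '/'
-- 		else:
-- 			key += parts[i]
-- 	return key
-- ===== SOURCE B (Python) =====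
-- high_sort_key = chr(0x7e)
--
-- def module_sort_key(mod):
-- 	'''
-- 	Sort key for .o files in module.mk
--
-- 	Files in a directory always before sub-dir contents.
-- 	Alphabetical order otherwise.
-- 	'''
-- 	idx = mod.rfind('/')
-- 	if idx == -1:
-- 		return mod
-- 	return high_sort_key + mod[:idx].replace('/', '/' + high_sort_key) + '/' + mod[idx+1:]
-- ===== Notes on version B (the rewrite author's own statement) =====
-- stated objective: idiomatic
-- what changed: Replaces split-into-parts plus an indexed loop with branch by direct string work: rfind locates the last separator, one str.replace over the head inserts the high-sort markers, and the final segment is re-attached bare.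
import Mathlib
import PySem

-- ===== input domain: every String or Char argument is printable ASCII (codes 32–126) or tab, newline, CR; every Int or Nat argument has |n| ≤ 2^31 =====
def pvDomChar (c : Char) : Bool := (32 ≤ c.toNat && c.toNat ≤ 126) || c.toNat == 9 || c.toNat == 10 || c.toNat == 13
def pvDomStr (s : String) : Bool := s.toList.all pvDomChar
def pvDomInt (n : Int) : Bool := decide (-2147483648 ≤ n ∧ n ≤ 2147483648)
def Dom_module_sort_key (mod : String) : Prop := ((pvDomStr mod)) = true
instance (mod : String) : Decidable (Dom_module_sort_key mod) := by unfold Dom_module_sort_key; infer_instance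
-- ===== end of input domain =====

-- B re-implements the split-parts loop idiomatically: rfind locates the last separator, one
-- str.replace over the head marks every earlier segment, and the final segment is re-attached
-- bare (same linear cost; neither version has side effects).

-- ===== PORT A =====
def module_sort_key (mod : String) : String :=
  let parts : List String := (PySem.Str.split? mod "/").getD []
  let nparts : Nat := parts.length
  (PySem.List.pyRange 0 (nparts : Int) 1).foldl
    (fun key i =>
      if i < (nparts : Int) - 1 then key ++ "~" ++ PySem.List.pyGetD parts i "" ++ "/"
      else key ++ PySem.List.pyGetD parts i "") ""

-- ===== PORT B =====
def module_sort_key_alt (mod : String) : String :=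
  let idx : Int := PySem.Str.rfind mod "/"
  if idx = -1 then mod
  else "~" ++ PySem.Str.replace (PySem.Str.slice mod none (some idx)) "/" ("/" ++ "~")
         ++ "/" ++ PySem.Str.slice mod (some (idx + 1)) none

-- ===== PRECONDITION & SPEC =====
def Spec_module_sort_key (mod : String) (out : String) : Prop := out = module_sort_key_alt mod
instance (mod : String) (out : String) : Decidable (Spec_module_sort_key mod out) := by unfold Spec_module_sort_key; infer_instance

-- ===== CLAIM (what is proved, stated in full; the proofs are below) =====
def Claim_equal_module_sort_key : Prop := ∀ (mod : String), Dom_module_sort_key mod → Spec_module_sort_key mod (module_sort_key mod)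

-- ===== LEMMAS AND PROOFS =====
def pvSplit1 : List Char → List (List Char)
  | [] => [[]]
  | c :: t =>
    if c = '/' then [] :: pvSplit1 t
    else match pvSplit1 t with
      | [] => [[c]]
      | p :: ps => (c :: p) :: ps
def pvConsHead (x : List Char) : List (List Char) → List (List Char)
  | [] => [x]
  | p :: ps => (x ++ p) :: ps
lemma pvSplit1_ne_nil (l : List Char) : pvSplit1 l ≠ [] := by
  cases l with
  | nil => simp [pvSplit1]
  | cons c t =>
    simp only [pvSplit1]
    split_ifs
    · simp
    · cases h : pvSplit1 t <;> simp

lemma pvSplitOn_go_eq (fuel : Nat) (l cur : List Char) (acc : List (List Char))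
    (h : l.length ≤ fuel) :
    PySem.Chars.splitOn.go ['/'] fuel l cur acc
      = acc.reverse ++ pvConsHead cur.reverse (pvSplit1 l) := by
  induction fuel generalizing l cur acc with
  | zero =>
    interval_cases hl : l.length
    · rw [List.length_eq_zero_iff] at hl; subst hl
      rw [PySem.Chars.splitOn.go.eq_def]
      simp [pvSplit1, pvConsHead]
  | succ fuel ih =>
    cases l with
    | nil =>
      rw [PySem.Chars.splitOn.go.eq_def]
      simp [pvSplit1, pvConsHead]
    | cons c rest =>
      rw [PySem.Chars.splitOn.go.eq_def]
      simp only [List.length_cons, Nat.add_le_add_iff_right] at h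
      by_cases hc : c = '/'
      · subst hc
        have hp : List.isPrefixOf ['/'] ('/' :: rest) = true := by simp [List.isPrefixOf]
        simp only [hp, if_pos]
        have hd : List.drop (['/'] : List Char).length ('/' :: rest) = rest := by simp
        rw [hd, ih rest [] (cur.reverse :: acc) h]
        simp only [pvSplit1]
        cases hs : pvSplit1 rest with
        | nil => exact absurd hs (pvSplit1_ne_nil rest)
        | cons p ps => simp [pvConsHead]
      · have hp : List.isPrefixOf ['/'] (c :: rest) = false := by
          simp [List.isPrefixOf]
          intro h'; exact hc h'.symm
        simp only [hp, Bool.false_eq_true, if_false]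
        rw [ih rest (c :: cur) acc h]
        simp only [pvSplit1, if_neg hc]
        cases hs : pvSplit1 rest with
        | nil => exact absurd hs (pvSplit1_ne_nil rest)
        | cons p ps => simp [pvConsHead]

lemma pvSplitOn_eq (l : List Char) : PySem.Chars.splitOn l ['/'] = pvSplit1 l := by
  rw [PySem.Chars.splitOn, pvSplitOn_go_eq (l.length + 1) l [] [] (by omega)]
  cases hs : pvSplit1 l with
  | nil => exact absurd hs (pvSplit1_ne_nil l)
  | cons p ps => simp [pvConsHead]
def pvRep : List Char → List Char
  | [] => []
  | c :: t => if c = '/' then '/' :: '~' :: pvRep t else c :: pvRep t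

lemma pvReplace_go_eq (fuel : Nat) (l acc : List Char) (h : l.length ≤ fuel) :
    PySem.Chars.replace.go ['/'] ['/', '~'] fuel l acc = acc.reverse ++ pvRep l := by
  induction fuel generalizing l acc with
  | zero =>
    have hl : l = [] := by
      cases l with
      | nil => rfl
      | cons c t => simp at h
    subst hl
    rw [PySem.Chars.replace.go.eq_def]
    simp [pvRep]
  | succ fuel ih =>
    cases l with
    | nil =>
      rw [PySem.Chars.replace.go.eq_def]
      simp [pvRep]
    | cons c rest =>
      rw [PySem.Chars.replace.go.eq_def]
      simp only [List.length_cons, Nat.add_le_add_iff_right] at h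
      by_cases hc : c = '/'
      · subst hc
        have hp : List.isPrefixOf ['/'] ('/' :: rest) = true := by simp [List.isPrefixOf]
        simp only [hp, if_pos]
        have hd : List.drop (['/'] : List Char).length ('/' :: rest) = rest := by simp
        rw [hd, ih rest _ h]
        simp [pvRep]
      · have hp : List.isPrefixOf ['/'] (c :: rest) = false := by
          simp [List.isPrefixOf]
          intro h'; exact hc h'.symm
        simp only [hp, Bool.false_eq_true, if_false]
        rw [ih rest (c :: acc) h]
        simp [pvRep, hc]

lemma pvReplace_eq (l : List Char) :
    PySem.Chars.replace l ['/'] ['/', '~'] = pvRep l := by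
  rw [PySem.Chars.replace]
  simp only [List.isEmpty_cons, Bool.false_eq_true, if_false]
  exact pvReplace_go_eq l.length l [] le_rfl

lemma pvSplit1_append (x y : List Char) :
    pvSplit1 (x ++ '/' :: y) = pvSplit1 x ++ pvSplit1 y := by
  induction x with
  | nil => simp [pvSplit1]
  | cons c t ih =>
    by_cases hc : c = '/'
    · subst hc; simp [pvSplit1, ih]
    · simp only [List.cons_append, pvSplit1, if_neg hc, ih]
      cases hs : pvSplit1 t with
      | nil => exact absurd hs (pvSplit1_ne_nil t)
      | cons p ps => simp

lemma pvSplit1_no_slash (l : List Char) (h : '/' ∉ l) : pvSplit1 l = [l] := by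
  induction l with
  | nil => simp [pvSplit1]
  | cons c t ih =>
    simp only [List.mem_cons, not_or] at h
    simp [pvSplit1, if_neg (Ne.symm h.1), ih h.2]

lemma pvFlatMap_marker (a : List Char) :
    (pvSplit1 a).flatMap (fun p => '~' :: (p ++ ['/'])) = '~' :: (pvRep a ++ ['/']) := by
  induction a with
  | nil => simp [pvSplit1, pvRep]
  | cons c t ih =>
    by_cases hc : c = '/'
    · subst hc; simp [pvSplit1, pvRep, ih]
    · simp only [pvSplit1, if_neg hc, pvRep]
      cases hs : pvSplit1 t with
      | nil => exact absurd hs (pvSplit1_ne_nil t)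
      | cons p ps =>
        rw [hs] at ih
        simp only [List.flatMap_cons, List.cons_append, List.append_assoc,
          List.cons.injEq, true_and, List.nil_append] at ih
        simp [ih]

lemma pvPrefix_slash (xs : List Char) :
    List.isPrefixOf ['/'] xs = true ↔ ∃ t, xs = '/' :: t := by
  cases xs with
  | nil => simp [List.isPrefixOf]
  | cons c t =>
    constructor
    · intro h
      have hc : '/' = c := by simpa [List.isPrefixOf] using h
      exact ⟨t, by rw [← hc]⟩
    · rintro ⟨t', ht⟩
      injection ht with h1 h2
      simp [List.isPrefixOf, h1]

lemma pvRfind_go_none (l : List Char) (h : '/' ∉ l) (j : Nat) :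
    PySem.Chars.rfind.go l ['/'] j = -1 := by
  induction j with
  | zero =>
    rw [PySem.Chars.rfind.go.eq_def]
    have : List.isPrefixOf ['/'] l = false := by
      rw [Bool.eq_false_iff]
      intro hp
      obtain ⟨t, ht⟩ := (pvPrefix_slash l).mp hp
      exact h (ht ▸ List.mem_cons_self)
    simp [this]
  | succ j ih =>
    rw [PySem.Chars.rfind.go.eq_def]
    have : List.isPrefixOf ['/'] (l.drop (j + 1)) = false := by
      rw [Bool.eq_false_iff]
      intro hp
      obtain ⟨t, ht⟩ := (pvPrefix_slash _).mp hp
      exact h (List.drop_subset _ l (ht ▸ List.mem_cons_self))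
    simp [this, ih]

lemma pvRfind_go_last (a b : List Char) (hb : '/' ∉ b) (j : Nat) (hj : a.length ≤ j) :
    PySem.Chars.rfind.go (a ++ '/' :: b) ['/'] j = (a.length : Int) := by
  induction j with
  | zero =>
    have ha : a = [] := List.length_eq_zero_iff.mp (Nat.le_zero.mp hj)
    subst ha
    rw [PySem.Chars.rfind.go.eq_def]
    simp [(pvPrefix_slash _).mpr ⟨b, rfl⟩]
  | succ j ih =>
    rw [PySem.Chars.rfind.go.eq_def]
    by_cases he : a.length = j + 1
    · have hd : (a ++ '/' :: b).drop (j + 1) = '/' :: b := by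
        rw [← he, List.drop_left]
      simp [hd, (pvPrefix_slash _).mpr ⟨b, rfl⟩, he]
    · have hlt : a.length ≤ j := by omega
      have hd : (a ++ '/' :: b).drop (j + 1) = b.drop (j - a.length) := by
        have h1 : j + 1 = a.length + (j - a.length + 1) := by omega
        rw [h1, List.drop_append]
        have e1 : List.drop (a.length + (j - a.length + 1)) a = [] :=
          List.drop_eq_nil_of_le (by omega)
        have e2 : a.length + (j - a.length + 1) - a.length = j - a.length + 1 := by omega
        rw [e1, e2, List.drop_succ_cons, List.nil_append]
      have hp : List.isPrefixOf ['/'] ((a ++ '/' :: b).drop (j + 1)) = false := by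
        rw [Bool.eq_false_iff]
        intro hpp
        obtain ⟨t, ht⟩ := (pvPrefix_slash _).mp hpp
        rw [hd] at ht
        exact hb (List.drop_subset _ b (ht ▸ List.mem_cons_self))
      simp [hp, ih hlt]

lemma pvExists_last_slash (l : List Char) (h : '/' ∈ l) :
    ∃ a b, l = a ++ '/' :: b ∧ '/' ∉ b := by
  induction l with
  | nil => simp at h
  | cons c t ih =>
    by_cases ht : '/' ∈ t
    · obtain ⟨a, b, hab, hnb⟩ := ih ht
      exact ⟨c :: a, b, by rw [hab]; rfl, hnb⟩
    · have hc : c = '/' := by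
        rcases List.mem_cons.mp h with h1 | h1
        · exact h1.symm
        · exact absurd h1 ht
      exact ⟨[], t, by simp [hc], ht⟩

lemma pvFold_prefix (parts : List String) (m : Nat) (hm : m + 1 ≤ parts.length) :
    ((PySem.List.pyRange 0 (m : Int) 1).foldl
      (fun key i =>
        if i < (parts.length : Int) - 1 then key ++ "~" ++ PySem.List.pyGetD parts i "" ++ "/"
        else key ++ PySem.List.pyGetD parts i "") "").toList
      = (parts.take m).flatMap (fun p => '~' :: (p.toList ++ ['/'])) := by
  induction m with
  | zero => simp
  | succ m ih =>
    have ih' := ih (by omega)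
    have hr : PySem.List.pyRange 0 ((m + 1 : Nat) : Int) 1
        = PySem.List.pyRange 0 (m : Int) 1 ++ [(m : Int)] := by
      push_cast
      exact PySem.List.pyRange_one_succ_right (by exact_mod_cast Nat.zero_le m)
    rw [hr, List.foldl_append]
    simp only [List.foldl_cons, List.foldl_nil]
    have hc : ((m : Int) < (parts.length : Int) - 1) := by
      have h2 : ((m : Int)) + 1 + 1 ≤ (parts.length : Int) := by exact_mod_cast hm
      omega
    rw [if_pos hc]
    have hg : PySem.List.pyGetD parts ((m : Nat) : Int) "" = parts.getD m "" := by
      simp [PySem.List.pyGetD_natCast]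
    rw [hg]
    have htake : parts.take (m + 1) = parts.take m ++ [parts.getD m ""] := by
      rw [List.getD_eq_getElem _ _ (by omega)]
      rw [List.take_add_one]
      congr 1
      simp [List.getElem?_eq_getElem (show m < parts.length by omega)]
    rw [htake]
    simp [ih']

lemma pvFold_full (parts : List String) (k : Nat) (hk : parts.length = k + 1) :
    ((PySem.List.pyRange 0 (parts.length : Int) 1).foldl
      (fun key i =>
        if i < (parts.length : Int) - 1 then key ++ "~" ++ PySem.List.pyGetD parts i "" ++ "/"
        else key ++ PySem.List.pyGetD parts i "") "").toList
      = (parts.take k).flatMap (fun p => '~' :: (p.toList ++ ['/'])) ++ (parts.getD k "").toList := by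
  have hr : PySem.List.pyRange 0 ((parts.length : Nat) : Int) 1
      = PySem.List.pyRange 0 (k : Int) 1 ++ [(k : Int)] := by
    rw [hk]; push_cast
    exact PySem.List.pyRange_one_succ_right (by exact_mod_cast Nat.zero_le k)
  rw [hr, List.foldl_append]
  simp only [List.foldl_cons, List.foldl_nil]
  have hc : ¬ ((k : Int) < (parts.length : Int) - 1) := by
    rw [hk]; push_cast; omega
  rw [if_neg hc]
  have hg : PySem.List.pyGetD parts ((k : Nat) : Int) "" = parts.getD k "" := by
    simp [PySem.List.pyGetD_natCast]
  rw [hg]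
  simp [pvFold_prefix parts k (by omega)]

theorem module_sort_key_spec : Claim_equal_module_sort_key := by
  intro mod _
  unfold Spec_module_sort_key
  rw [← String.toList_inj]
  have hparts : (PySem.Str.split? mod "/").getD []
      = (pvSplit1 mod.toList).map String.ofList := by
    rw [PySem.Str.split?]
    have h1 : ("/" : String).toList = ['/'] := rfl
    rw [h1, PySem.Chars.split?]
    simp [pvSplitOn_eq]
  simp only [module_sort_key, module_sort_key_alt, hparts]
  by_cases hs : '/' ∈ mod.toList
  · -- there is a slash: decompose at the last one
    obtain ⟨a, b, hab, hnb⟩ := pvExists_last_slash mod.toList hs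
    have hrf : PySem.Str.rfind mod "/" = (a.length : Int) := by
      rw [PySem.Str.rfind]
      have h1 : ("/" : String).toList = ['/'] := rfl
      rw [h1, PySem.Chars.rfind, hab]
      exact pvRfind_go_last a b hnb _ (by simp)
    have hne : ((a.length : Int)) ≠ -1 := by omega
    rw [hrf, if_neg hne]
    -- B side
    have hslice1 : (PySem.Str.slice mod none (some ((a.length : Nat) : Int))).toList = a := by
      rw [PySem.Str.toList_slice, PySem.Chars.slice_eq_listSlice,
        PySem.List.slice_to_natCast, hab]
      exact List.take_left
    have hslice2 : (PySem.Str.slice mod (some (((a.length : Nat) : Int) + 1)) none).toList = b := by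
      rw [PySem.Str.toList_slice, PySem.Chars.slice_eq_listSlice]
      have hc : ((a.length : Nat) : Int) + 1 = ((a.length + 1 : Nat) : Int) := by push_cast; ring
      rw [hc, PySem.List.slice_from_natCast, hab]
      have h1 : a.length + 1 = a.length + (0 + 1) := by omega
      rw [h1, List.drop_append]
      have e1 : List.drop (a.length + (0 + 1)) a = [] := List.drop_eq_nil_of_le (by omega)
      have e2 : a.length + (0 + 1) - a.length = 0 + 1 := by omega
      rw [e1, e2, List.drop_succ_cons, List.nil_append, List.drop_zero]
    have hrep : (PySem.Str.replace (PySem.Str.slice mod none (some ((a.length : Nat) : Int)))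
        "/" ("/" ++ "~")).toList = pvRep a := by
      rw [PySem.Str.toList_replace, hslice1]
      have h1 : ("/" : String).toList = ['/'] := rfl
      have h2 : ("/" ++ "~" : String).toList = ['/', '~'] := by simp
      rw [h1, h2, pvReplace_eq]
    -- A side
    have hsp : pvSplit1 mod.toList = pvSplit1 a ++ [b] := by
      rw [hab, pvSplit1_append, pvSplit1_no_slash b hnb]
    have hlen : ((pvSplit1 mod.toList).map String.ofList).length = (pvSplit1 a).length + 1 := by
      simp [hsp]
    rw [pvFold_full _ (pvSplit1 a).length hlen]
    have htk : ((pvSplit1 mod.toList).map String.ofList).take (pvSplit1 a).length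
        = (pvSplit1 a).map String.ofList := by
      rw [hsp, List.map_append]
      have : ((pvSplit1 a).map String.ofList).length = (pvSplit1 a).length := by simp
      rw [← this, List.take_left]
    have hgd : ((pvSplit1 mod.toList).map String.ofList).getD (pvSplit1 a).length ""
        = String.ofList b := by
      rw [hsp, List.map_append]
      rw [List.getD_eq_getElem _ _ (by simp)]
      simp
    rw [htk, hgd]
    rw [List.flatMap_map]
    simp only [String.toList_ofList]
    rw [pvFlatMap_marker]
    have ht1 : ("~" : String).toList = ['~'] := rfl
    have ht2 : ("/" : String).toList = ['/'] := rfl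
    rw [String.toList_append, String.toList_append, String.toList_append, hrep, hslice2, ht1, ht2]
    simp
  · -- no slash: B returns mod unchanged
    have hrf : PySem.Str.rfind mod "/" = -1 := by
      rw [PySem.Str.rfind]
      have h1 : ("/" : String).toList = ['/'] := rfl
      rw [h1, PySem.Chars.rfind]
      exact pvRfind_go_none mod.toList hs _
    rw [hrf, if_pos rfl]
    have hsp : pvSplit1 mod.toList = [mod.toList] := pvSplit1_no_slash _ hs
    have hlen : ((pvSplit1 mod.toList).map String.ofList).length = 0 + 1 := by simp [hsp]
    rw [pvFold_full _ 0 hlen]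
    simp [hsp]
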